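-- pv_equiv track=rewrite | github.com/XtraWyze/AI-Assistant-v2 | wyzer/core/deterministic_splitter.py | _find_connector
-- ===== SOURCE A (Python) =====
-- from typing import Optional, Dict, Any, List, Tuple, TYPE_CHECKING
--
-- _CONNECTORS = [
--     " and then ",
--     " then ",
--     " and ",
--     " also ",
--     " plus ",
--     "; ",
--     ";",
--     ". ",  # Sentence boundary: "pause. what's a VPN?"
--     ", ",
--     ",",
-- ]
--
-- def _find_connector(text_lower: str) -> Optional[Tuple[int, int, str]]:
--     """
--     Find the first connector in text.
--
--     Returns:
--         (start_idx, end_idx, connector_str) if found, None otherwise.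
--     """
--     earliest_match = None
--
--     for connector in _CONNECTORS:
--         idx = text_lower.find(connector.lower())
--         if idx >= 0:
--             end_idx = idx + len(connector)
--             if earliest_match is None or idx < earliest_match[0]:
--                 earliest_match = (idx, end_idx, connector)
--
--     return earliest_match
-- ===== SOURCE B (Python) =====
-- from typing import Optional, Tuple
--
-- _CONNECTORS = [
--     " and then ",
--     " then ",
--     " and ",
--     " also ",
--     " plus ",
--     "; ",
--     ";",
--     ". ",
--     ", ",
--     ",",
-- ]
--
-- def _find_connector(text_lower: str) -> Optional[Tuple[int, int, str]]:
--     """Single left-to-right positional scan: at each index try the connectors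
--     in declared order and return the first hit, which is automatically the
--     earliest one with A's list-order tie-break."""
--     for i in range(len(text_lower)):
--         for connector in _CONNECTORS:
--             if text_lower.startswith(connector, i):
--                 return (i, i + len(connector), connector)
--     return None
-- ===== Notes on version B (the rewrite author's own statement) =====
-- stated objective: alternative
-- what changed: Replaces A's per-connector full-text .find scans with earliest-match bookkeeping by one left-to-right positional scan that tries connectors in list order at each index and returns at the first hit.
import Mathlib
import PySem

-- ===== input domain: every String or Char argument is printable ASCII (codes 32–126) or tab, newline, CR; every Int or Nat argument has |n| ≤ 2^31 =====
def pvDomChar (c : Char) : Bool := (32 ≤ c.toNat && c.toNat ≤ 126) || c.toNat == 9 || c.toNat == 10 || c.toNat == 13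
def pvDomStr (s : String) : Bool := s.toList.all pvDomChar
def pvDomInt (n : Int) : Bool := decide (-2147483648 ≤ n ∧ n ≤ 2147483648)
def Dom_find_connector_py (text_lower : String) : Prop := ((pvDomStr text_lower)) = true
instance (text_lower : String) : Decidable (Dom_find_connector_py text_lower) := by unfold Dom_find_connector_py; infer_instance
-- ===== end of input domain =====

-- B replaces A's per-connector full-text find scans by one left-to-right positional scan
-- (alternative decomposition; same exact result, including the list-order tie-break).

-- ===== PORT A =====
def pvConnectors : List String :=
  [" and then ", " then ", " and ", " also ", " plus ", "; ", ";", ". ", ", ", ","]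

def find_connector_py (text_lower : String) : Option (Int × Int × String) :=
  pvConnectors.foldl (fun earliest connector =>
    let idx := PySem.Str.find text_lower (PySem.Str.lower connector)
    if 0 ≤ idx then
      let endIdx := idx + (PySem.Str.len connector : Int)
      match earliest with
      | none => some (idx, endIdx, connector)
      | some e => if idx < e.1 then some (idx, endIdx, connector) else some e
    else earliest) none

-- ===== PORT B =====
-- hand port of Python's `text.startswith(connector, i)` for 0 ≤ i: prefix test on text[i:] (exact there)
def pvAltGo (s : List Char) (i : Nat) : Option (Int × Int × String) :=
  if i < s.length then
    match pvConnectors.find? (fun c => PySem.Chars.startswith (s.drop i) c.toList) with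
    | some c => some ((i : Int), (i : Int) + (PySem.Str.len c : Int), c)
    | none => pvAltGo s (i + 1)
  else none
termination_by s.length - i

def find_connector_py_alt (text_lower : String) : Option (Int × Int × String) :=
  pvAltGo text_lower.toList 0

-- ===== PRECONDITION & SPEC =====
def Spec_find_connector_py (text_lower : String) (out : Option (Int × Int × String)) : Prop := out = find_connector_py_alt text_lower
instance (text_lower : String) (out : Option (Int × Int × String)) : Decidable (Spec_find_connector_py text_lower out) := by unfold Spec_find_connector_py; infer_instance

-- ===== CLAIM (what is proved, stated in full; the proofs are below) =====
def Claim_equal_find_connector_py : Prop := ∀ (text_lower : String), Dom_find_connector_py text_lower → Spec_find_connector_py text_lower (find_connector_py text_lower)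

-- ===== LEMMAS AND PROOFS =====

-- A's candidate for one connector: its find-result packaged, none if absent
def pvCand (t : List Char) (c : String) : Option (Int × Int × String) :=
  if 0 ≤ PySem.Chars.find t c.toList then
    some (PySem.Chars.find t c.toList, PySem.Chars.find t c.toList + (PySem.Str.len c : Int), c)
  else none

-- A's accumulator update: keep the left value unless the right one is strictly earlier
def pvCombine (a b : Option (Int × Int × String)) : Option (Int × Int × String) :=
  match a, b with
  | none, b => b
  | some x, none => some x
  | some x, some y => if y.1 < x.1 then some y else some x

-- the first connector (in list order) matching at position i
def pvQ (C : List String) (t : List Char) (i : Nat) : Option String :=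
  C.find? (fun c => PySem.Chars.startswith (t.drop i) c.toList)

-- the common characterization both ports are proved to satisfy
def pvSpec (C : List String) (t : List Char) (r : Option (Int × Int × String)) : Prop :=
  (r = none ∧ ∀ i, pvQ C t i = none) ∨
  (∃ i c, (∀ j < i, pvQ C t j = none) ∧ pvQ C t i = some c ∧
    r = some ((i : Int), (i : Int) + (PySem.Str.len c : Int), c))

theorem pvCombine_none_right (a : Option (Int × Int × String)) : pvCombine a none = a := by
  cases a <;> rfl

theorem pvCombine_assoc (a b c : Option (Int × Int × String)) :
    pvCombine (pvCombine a b) c = pvCombine a (pvCombine b c) := by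
  cases a with
  | none => rfl
  | some x =>
    cases b with
    | none => rfl
    | some y =>
      cases c with
      | none => simp only [pvCombine]; split_ifs <;> rfl
      | some z =>
        simp only [pvCombine]
        split_ifs <;> simp only [pvCombine] <;> split_ifs <;> first | rfl | omega

theorem pvFoldl_combine (os : List (Option (Int × Int × String)))
    (acc : Option (Int × Int × String)) :
    os.foldl pvCombine acc = pvCombine acc (os.foldr pvCombine none) := by
  induction os generalizing acc with
  | nil => simp [List.foldr, pvCombine_none_right]
  | cons o os ih => simp [List.foldl, List.foldr, ih, pvCombine_assoc]

theorem pvA_eq_fold (text_lower : String) :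
    find_connector_py text_lower =
      ((pvConnectors.map (pvCand text_lower.toList)).foldr pvCombine none) := by
  have hstep : ∀ (acc : Option (Int × Int × String)) (c : String), c ∈ pvConnectors →
      (fun earliest connector =>
        let idx := PySem.Str.find text_lower (PySem.Str.lower connector)
        if 0 ≤ idx then
          let endIdx := idx + (PySem.Str.len connector : Int)
          match earliest with
          | none => some (idx, endIdx, connector)
          | some e => if idx < e.1 then some (idx, endIdx, connector) else some e
        else earliest) acc c = pvCombine acc (pvCand text_lower.toList c) := by
    intro acc c hc
    have hlow : PySem.Str.lower c = c := by
      fin_cases hc <;> decide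
    simp only [hlow, PySem.Str.find_eq, pvCand]
    cases acc with
    | none => split_ifs <;> simp [pvCombine]
    | some e =>
        split_ifs with h1 <;> simp [pvCombine]
  calc find_connector_py text_lower
      = pvConnectors.foldl (fun acc c => pvCombine acc (pvCand text_lower.toList c)) none := by
        unfold find_connector_py
        exact PySem.List.foldl_congr_mem pvConnectors _ _ none (fun acc c hc => hstep acc c hc)
    _ = (pvConnectors.map (pvCand text_lower.toList)).foldl pvCombine none := by
        rw [List.foldl_map]
    _ = pvCombine none ((pvConnectors.map (pvCand text_lower.toList)).foldr pvCombine none) :=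
        pvFoldl_combine _ _
    _ = _ := rfl

theorem pvQ_cons (c : String) (C : List String) (t : List Char) (i : Nat) :
    pvQ (c :: C) t i =
      if PySem.Chars.startswith (t.drop i) c.toList then some c else pvQ C t i := by
  simp [pvQ, List.find?]
  split <;> simp_all

-- A's fold over any connector list satisfies the characterization
theorem pvFold_spec (t : List Char) (C : List String) :
    pvSpec C t ((C.map (pvCand t)).foldr pvCombine none) := by
  induction C with
  | nil =>
      left
      constructor
      · rfl
      · intro i; rfl
  | cons c C ih =>
      have hmatch : ∀ i : Nat, PySem.Chars.startswith (t.drop i) c.toList = true ↔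
          c.toList <+: t.drop i := fun i => PySem.Chars.startswith_iff _ _
      by_cases hc : 0 ≤ PySem.Chars.find t c.toList
      · -- c occurs; its find is f, first occurrence
        set f := PySem.Chars.find t c.toList with hf
        obtain ⟨hpre, hmin⟩ := PySem.Chars.find_spec (s := t) (sub := c.toList) hc
        have hcand : pvCand t c = some (f, f + (PySem.Str.len c : Int), c) := by
          simp [pvCand, ← hf, hc]
        have hfcast : ((f.toNat : Int)) = f := Int.toNat_of_nonneg hc
        -- position-level facts about Q for the extended list
        have hQc_at : pvQ (c :: C) t f.toNat = some c := by
          rw [pvQ_cons]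
          simp [(hmatch f.toNat).2 hpre]
        have hQc_lt : ∀ j < f.toNat, pvQ (c :: C) t j = pvQ C t j := by
          intro j hj
          rw [pvQ_cons]
          have : ¬ c.toList <+: t.drop j := hmin j hj
          simp [hmatch j, this]
        rcases ih with ⟨hnone, hQ⟩ | ⟨i, c', hmin', hQi, hr⟩
        · -- C contributes nothing: result is c's candidate
          right
          refine ⟨f.toNat, c, ?_, hQc_at, ?_⟩
          · intro j hj
            rw [hQc_lt j hj]; exact hQ j
          · simp [List.map, hnone, hcand, pvCombine, hfcast]
        · -- C's best is (i, c'); combine keeps the strictly earlier one, ties to c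
          rcases Nat.lt_or_ge i f.toNat with hlt | hge
          · right
            refine ⟨i, c', ?_, ?_, ?_⟩
            · intro j hj
              rw [hQc_lt j (Nat.lt_trans hj hlt)]; exact hmin' j hj
            · rw [hQc_lt i hlt]; exact hQi
            · have : (i : Int) < f := by
                omega
              simp [List.map, hr, hcand, pvCombine, this]
          · right
            refine ⟨f.toNat, c, ?_, hQc_at, ?_⟩
            · intro j hj
              rw [hQc_lt j hj]
              exact hmin' j (Nat.lt_of_lt_of_le hj hge)
            · have : ¬ ((i : Int) < f) := by omega
              simp [List.map, hr, hcand, pvCombine, this, hfcast]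
      · -- c never occurs: candidate none, Q unchanged at every position
        have hno : ¬ c.toList <:+: t := by
          have := (PySem.Chars.find_nonneg_iff (s := t) (sub := c.toList))
          tauto
        have hnopre : ∀ i : Nat, ¬ c.toList <+: t.drop i := by
          intro i hpre
          exact hno ((PySem.Chars.isIn_iff_infix _ _).1
            ((PySem.Chars.exists_prefix_drop_iff_isIn _ _).1 ⟨i, hpre⟩))
        have hQeq : ∀ i : Nat, pvQ (c :: C) t i = pvQ C t i := by
          intro i
          rw [pvQ_cons]
          simp [hmatch i, hnopre i]
        have hcand : pvCand t c = none := by simp [pvCand, hc]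
        have hfold : ((c :: C).map (pvCand t)).foldr pvCombine none
            = (C.map (pvCand t)).foldr pvCombine none := by
          simp [List.map, hcand, pvCombine]
        rw [hfold]
        rcases ih with ⟨hnone, hQ⟩ | ⟨i, c', hmin', hQi, hr⟩
        · left; exact ⟨hnone, fun i => (hQeq i).trans (hQ i)⟩
        · right
          exact ⟨i, c', fun j hj => (hQeq j).trans (hmin' j hj), (hQeq i).trans hQi, hr⟩

theorem pvConnectors_ne_nil : ∀ c ∈ pvConnectors, c.toList ≠ [] := by decide

theorem pvAltGo_spec (t : List Char) (i : Nat)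
    (h : ∀ j < i, pvQ pvConnectors t j = none) :
    pvSpec pvConnectors t (pvAltGo t i) := by
  by_cases hlen : i < t.length
  · rw [pvAltGo, if_pos hlen]
    cases hfind : pvConnectors.find? (fun c => PySem.Chars.startswith (t.drop i) c.toList) with
    | some c =>
        right
        exact ⟨i, c, h, hfind, rfl⟩
    | none =>
        have := pvAltGo_spec t (i + 1) (by
          intro j hj
          rcases Nat.lt_or_ge j i with hji | hji
          · exact h j hji
          · have : j = i := by omega
            subst this; exact hfind)
        simpa using this
  · rw [pvAltGo, if_neg hlen]
    left
    refine ⟨rfl, fun j => ?_⟩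
    rcases Nat.lt_or_ge j i with hji | hji
    · exact h j hji
    · have hdrop : t.drop j = [] := List.drop_eq_nil_of_le (by omega)
      apply List.find?_eq_none.2
      intro c hc
      have hne := pvConnectors_ne_nil c hc
      simp only [hdrop]
      cases hcl : c.toList with
      | nil => exact absurd hcl hne
      | cons x xs =>
          simp only [Bool.not_eq_true]
          rw [← hcl]
          by_contra hsw
          have : c.toList <+: ([] : List Char) :=
            (PySem.Chars.startswith_iff _ _).1 (by simpa using hsw)
          simp [hcl] at this
termination_by t.length - i
decreasing_by omega

theorem pvSpec_unique (C : List String) (t : List Char)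
    (r₁ r₂ : Option (Int × Int × String))
    (h₁ : pvSpec C t r₁) (h₂ : pvSpec C t r₂) : r₁ = r₂ := by
  rcases h₁ with ⟨hn₁, hQ₁⟩ | ⟨i₁, c₁, hm₁, hq₁, hr₁⟩ <;>
    rcases h₂ with ⟨hn₂, hQ₂⟩ | ⟨i₂, c₂, hm₂, hq₂, hr₂⟩
  · rw [hn₁, hn₂]
  · rw [hQ₁ i₂] at hq₂; exact absurd hq₂ (by simp)
  · rw [hQ₂ i₁] at hq₁; exact absurd hq₁ (by simp)
  · have hi : i₁ = i₂ := by
      rcases Nat.lt_trichotomy i₁ i₂ with h | h | h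
      · rw [hm₂ i₁ h] at hq₁; exact absurd hq₁ (by simp)
      · exact h
      · rw [hm₁ i₂ h] at hq₂; exact absurd hq₂ (by simp)
    subst hi
    rw [hq₁] at hq₂
    injection hq₂ with hc
    rw [hr₁, hr₂, hc]

-- ===== VERDICT (by name: the statement is the Claim_ definition above) =====
theorem find_connector_py_spec : Claim_equal_find_connector_py := by
  intro text_lower _
  unfold Spec_find_connector_py find_connector_py_alt
  rw [pvA_eq_fold]
  exact pvSpec_unique pvConnectors text_lower.toList _ _
    (pvFold_spec text_lower.toList pvConnectors)
    (pvAltGo_spec text_lower.toList 0 (by intro j hj; omega))
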